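-- pv_equiv track=rewrite | github.com/anupyadav27/threat-engine | engine_secops/scanner_engine/java_scanner/logic_implementations.py | custom_formatting_open_brace_position
-- ===== SOURCE A (Python) =====
-- def custom_formatting_open_brace_position(node):
--     """
--     Detect open curly braces '{' that are not at the beginning of a line.
--     Returns True if violation is found.
--     """
--     if isinstance(node, dict):
--         source_code = node.get('source', '')
--         if not source_code:
--             return False
--         lines = source_code.split('\n')
--         for line in lines:
--             if '{' in line:
--                 # Check if line starts with '{' after optional whitespace
--                 if not line.strip().startswith('{'):
--                     # '{' is present but not at the beginning
--                     return True
--     return False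
-- ===== SOURCE B (Python) =====
-- def custom_formatting_open_brace_position(node):
--     """
--     Detect open curly braces '{' that are not at the beginning of a line.
--     Returns True if violation is found.
--     Single pass over the source, no splitting into lines: per line we are
--     'leading' while only whitespace has been seen, 'safe' once the first
--     non-whitespace char is '{', and 'danger' otherwise; any '{' met in
--     'danger' is a violation.
--     """
--     if not isinstance(node, dict):
--         return False
--     source = node.get('source', '')
--     if not source:
--         return False
--     state = 'leading'
--     for ch in source:
--         if ch == '\n':
--             state = 'leading'
--         elif state == 'leading':
--             if not ch.isspace():
--                 state = 'safe' if ch == '{' else 'danger'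
--         elif state == 'danger' and ch == '{':
--             return True
--     return False
-- ===== Notes on version B (the rewrite author's own statement) =====
-- stated objective: alternative
-- what changed: A splits the source into lines and runs '{' in line plus line.strip().startswith('{') per line; B makes a single pass over the characters with a 3-state per-line scanner (leading-whitespace / safe / danger) and returns True as soon as a '{' is seen after a non-'{' line start, never materialising the line list.
import Mathlib
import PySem

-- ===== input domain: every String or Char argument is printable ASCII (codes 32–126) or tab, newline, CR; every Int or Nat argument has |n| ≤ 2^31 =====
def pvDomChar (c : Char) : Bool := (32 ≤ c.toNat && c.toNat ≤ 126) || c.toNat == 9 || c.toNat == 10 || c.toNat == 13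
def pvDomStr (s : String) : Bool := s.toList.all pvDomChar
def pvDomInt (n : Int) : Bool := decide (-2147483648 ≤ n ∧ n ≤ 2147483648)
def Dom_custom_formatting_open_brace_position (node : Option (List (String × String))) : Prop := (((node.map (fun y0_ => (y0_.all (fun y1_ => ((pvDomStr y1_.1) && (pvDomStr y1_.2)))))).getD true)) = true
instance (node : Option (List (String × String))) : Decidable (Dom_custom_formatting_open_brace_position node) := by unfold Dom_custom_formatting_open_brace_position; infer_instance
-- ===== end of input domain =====

-- B replaces A's split-into-lines + per-line strip/contains passes with a single pass over the
-- characters (a 3-state per-line scanner); same return value, no list of lines is built (objective: alternative).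

-- ===== PORT A =====
-- for line in lines: if '{' in line and not line.strip().startswith('{'): return True
def cfViolLoop : List (List Char) → Bool
  | [] => false
  | l :: rest =>
    if PySem.Chars.isIn ['{'] l then
      if !(PySem.Chars.startswith (PySem.Chars.strip l) ['{']) then true
      else cfViolLoop rest
    else cfViolLoop rest

def custom_formatting_open_brace_position (node : Option (List (String × String))) : Bool :=
  match node with
  | none => false
  | some d =>
    let source := PySem.Dict.getD (PySem.Dict.ofList d) "source" ""
    if source == "" then false
    else cfViolLoop (PySem.Chars.splitOn source.toList ['\n'])

-- ===== PORT B =====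
inductive CFState
  | leading | safe | danger
deriving DecidableEq, Repr

-- state = 'leading' | 'safe' | 'danger'; one pass over the characters
def cfScan : List Char → CFState → Bool
  | [], _ => false
  | c :: rest, st =>
    if c = '\n' then cfScan rest .leading
    else
      match st with
      | .leading =>
        if !(PySem.Chars.isspace c) then
          cfScan rest (if c = '{' then .safe else .danger)
        else cfScan rest .leading
      | .danger => if c = '{' then true else cfScan rest .danger
      | .safe => cfScan rest .safe

def custom_formatting_open_brace_position_alt (node : Option (List (String × String))) : Bool :=
  match node with
  | none => false
  | some d =>
    let source := PySem.Dict.getD (PySem.Dict.ofList d) "source" ""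
    if source == "" then false
    else cfScan source.toList .leading

-- ===== PRECONDITION & SPEC =====
def Spec_custom_formatting_open_brace_position (node : Option (List (String × String))) (out : Bool) : Prop := out = custom_formatting_open_brace_position_alt node
instance (node : Option (List (String × String))) (out : Bool) : Decidable (Spec_custom_formatting_open_brace_position node out) := by unfold Spec_custom_formatting_open_brace_position; infer_instance

-- ===== CLAIM (what is proved, stated in full; the proofs are below) =====
def Claim_equal_custom_formatting_open_brace_position : Prop := ∀ (node : Option (List (String × String))), Dom_custom_formatting_open_brace_position node → Spec_custom_formatting_open_brace_position node (custom_formatting_open_brace_position node)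

-- ===== LEMMAS AND PROOFS =====

-- recursive characterisation of splitting on '\n': (current line, remaining lines)
def splitNL : List Char → List Char × List (List Char)
  | [] => ([], [])
  | c :: rest =>
    let p := splitNL rest
    if c = '\n' then ([], p.1 :: p.2) else (c :: p.1, p.2)

-- the per-line test of A's loop body
def cfViol (l : List Char) : Bool :=
  PySem.Chars.isIn ['{'] l && !(PySem.Chars.startswith (PySem.Chars.strip l) ['{'])

theorem splitOn_go_eq :
    ∀ (fuel : Nat) (l cur : List Char) (acc : List (List Char)), l.length < fuel →
      PySem.Chars.splitOn.go ['\n'] fuel l cur acc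
        = acc.reverse ++ (cur.reverse ++ (splitNL l).1) :: (splitNL l).2 := by
  intro fuel
  induction fuel with
  | zero => intro l cur acc h; omega
  | succ n ih =>
    intro l cur acc h
    cases l with
    | nil => simp [PySem.Chars.splitOn.go, splitNL]
    | cons c rest =>
      by_cases hc : c = '\n'
      · subst hc
        have hr : rest.length < n := by simp at h; omega
        simp only [PySem.Chars.splitOn.go, List.isPrefixOf, beq_self_eq_true, Bool.true_and,
          if_true, splitNL]
        simp [ih rest [] (cur.reverse :: acc) hr]
      · have hpre : (['\n'].isPrefixOf (c :: rest)) = false := by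
          simp [List.isPrefixOf]
          exact fun hh => (hc hh.symm).elim
        simp only [PySem.Chars.splitOn.go, hpre, if_neg, Bool.false_eq_true, not_false_iff,
          if_false, splitNL]
        rw [ih rest (c :: cur) acc (by simpa using Nat.lt_of_succ_lt_succ h)]
        simp [hc]

theorem splitOn_eq (s : List Char) :
    PySem.Chars.splitOn s ['\n'] = (splitNL s).1 :: (splitNL s).2 := by
  unfold PySem.Chars.splitOn
  rw [splitOn_go_eq (s.length + 1) s [] [] (by omega)]
  simp

theorem cfViolLoop_eq_any (lines : List (List Char)) : cfViolLoop lines = lines.any cfViol := by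
  induction lines with
  | nil => simp [cfViolLoop]
  | cons l rest ih =>
    simp only [cfViolLoop, List.any_cons, cfViol, ih]
    by_cases h1 : PySem.Chars.isIn ['{'] l <;>
      by_cases h2 : PySem.Chars.startswith (PySem.Chars.strip l) ['{'] <;> simp [h1, h2]

theorem isIn_singleton (x : Char) (l : List Char) :
    PySem.Chars.isIn [x] l = l.contains x := by
  rw [Bool.eq_iff_iff, PySem.Chars.isIn_iff_infix, List.contains_iff_mem]
  constructor
  · intro h; exact h.subset (by simp)
  · intro h
    obtain ⟨s, t, rfl⟩ := List.append_of_mem h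
    exact ⟨s, t, by simp⟩

theorem rstrip_cons_of_not_space (c : Char) (h : PySem.Chars.isspace c = false) (xs : List Char) :
    PySem.Chars.rstrip (c :: xs) = c :: PySem.Chars.rstrip xs := by
  unfold PySem.Chars.rstrip
  simp only [List.reverse_cons, List.dropWhile_append]
  by_cases he : (List.dropWhile PySem.Chars.isspace xs.reverse).isEmpty
  · simp_all [List.isEmpty_iff]
  · simp [he]

theorem strip_cons_of_not_space (c : Char) (h : PySem.Chars.isspace c = false) (xs : List Char) :
    PySem.Chars.strip (c :: xs) = c :: PySem.Chars.rstrip xs := by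
  unfold PySem.Chars.strip PySem.Chars.lstrip
  rw [List.dropWhile_cons_of_neg (by simp [h]), rstrip_cons_of_not_space c h xs]

theorem cfViol_ws_cons (c : Char) (h : PySem.Chars.isspace c = true) (xs : List Char) :
    cfViol (c :: xs) = cfViol xs := by
  have hne : c ≠ '{' := by
    rintro rfl; simp [PySem.Chars.isspace] at h
  unfold cfViol
  rw [isIn_singleton, isIn_singleton]
  have hstrip : PySem.Chars.strip (c :: xs) = PySem.Chars.strip xs := by
    unfold PySem.Chars.strip PySem.Chars.lstrip
    rw [List.dropWhile_cons_of_pos (by simp [h])]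
  rw [hstrip]
  simp [List.contains_cons, Ne.symm hne]

theorem cfViol_brace_cons (xs : List Char) : cfViol ('{' :: xs) = false := by
  unfold cfViol
  rw [strip_cons_of_not_space '{' (by decide) xs]
  simp [PySem.Chars.startswith, List.isPrefixOf]

theorem cfViol_other_cons (c : Char) (hs : PySem.Chars.isspace c = false) (hb : c ≠ '{')
    (xs : List Char) : cfViol (c :: xs) = xs.contains '{' := by
  unfold cfViol
  rw [isIn_singleton, strip_cons_of_not_space c hs xs]
  simp [PySem.Chars.startswith, List.isPrefixOf, List.contains_cons, Ne.symm hb, hb]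

theorem cfScan_eq (s : List Char) :
    cfScan s .leading = ((splitNL s).1 :: (splitNL s).2).any cfViol
    ∧ cfScan s .safe = (splitNL s).2.any cfViol
    ∧ cfScan s .danger = ((splitNL s).1.contains '{' || (splitNL s).2.any cfViol) := by
  induction s with
  | nil =>
    refine ⟨?_, ?_, ?_⟩ <;> simp [cfScan, splitNL, cfViol, isIn_singleton]
  | cons c rest ih =>
    obtain ⟨ih1, ih2, ih3⟩ := ih
    by_cases hc : c = '\n'
    · subst hc
      refine ⟨?_, ?_, ?_⟩ <;>
        simp [cfScan, splitNL, ih1, cfViol, isIn_singleton]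
    · by_cases hs : PySem.Chars.isspace c
      · have hne : c ≠ '{' := by rintro rfl; simp [PySem.Chars.isspace] at hs
        refine ⟨?_, ?_, ?_⟩ <;>
          simp [cfScan, splitNL, hc, hs, hne, ih1, ih2, ih3,
            cfViol_ws_cons c hs, List.contains_cons, Ne.symm hne]
      · by_cases hb : c = '{'
        · subst hb
          refine ⟨?_, ?_, ?_⟩ <;>
            simp [cfScan, splitNL, hc, hs, ih1, ih2, ih3, cfViol_brace_cons,
              List.contains_cons]
        · refine ⟨?_, ?_, ?_⟩ <;>
            simp [cfScan, splitNL, hc, hs, hb, ih1, ih2, ih3,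
              cfViol_other_cons c (by simpa using hs) hb, List.contains_cons, Ne.symm hb]

-- ===== VERDICT (by name: the statement is the Claim_ definition above) =====
theorem custom_formatting_open_brace_position_spec : Claim_equal_custom_formatting_open_brace_position := by
  intro node _
  unfold Spec_custom_formatting_open_brace_position
  unfold custom_formatting_open_brace_position custom_formatting_open_brace_position_alt
  cases node with
  | none => rfl
  | some d =>
    simp only
    by_cases hsrc : (PySem.Dict.getD (PySem.Dict.ofList d) "source" "") == ""
    · simp [hsrc]
    · simp only [hsrc, if_false, Bool.false_eq_true]
      rw [splitOn_eq, cfViolLoop_eq_any, (cfScan_eq _).1]
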